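-- pv_equiv track=rewrite | github.com/LogicElements/visual-modbus | VisualModbus/Crc32.py | calculate
-- ===== SOURCE A (Python) =====
-- polynom = 0x04C11DB7
--
-- def reflect(value_input, bits):
--     """
--     Bit-wise reflection
--     :param value_input: Value to reflect
--     :param bits: Number of bits of data type
--     :return: Reflected number
--     """
--     value = 0
--
--     for i in range(bits):
--         if (value_input & 1) != 0:
--             value |= (1 << (bits - (i+1)))
--         value_input >>= 1
--     return value
--
-- def calculate(data, crc_val=0xFFFFFFFF):
--     """
--     Calculate CRC32 from array of integers
--     :param data: Input data as array of integers
--     :param crc_val: Initial value of crc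
--     :return: Crc
--     """
--     table = [0] * 256
--
--     for i in range(256):
--         table[i] = reflect(i, 8) << 24
--         for j in range(8):
--             table[i] = ((table[i] << 1) ^ (polynom if (table[i] & (1 << 31)) != 0 else 0)) & 0xFFFFFFFF
--         table[i] = reflect(table[i], 32)
--     data_byte = b''
--
--     for i in data:
--         data_byte += reflect(i, 32).to_bytes(4, byteorder='little')
--     for i in range(len(data_byte)):
--         crc_val = (crc_val >> 8) ^ table[((crc_val & 0xff) ^ data_byte[i])] & 0xFFFFFFFF
--
--     return reflect(crc_val, 32)
-- ===== SOURCE B (Python) =====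
-- def reflect(value_input, bits):
--     value = 0
--     for i in range(bits):
--         if (value_input & 1) != 0:
--             value |= (1 << (bits - (i + 1)))
--         value_input >>= 1
--     return value
--
-- def calculate(data, crc_val=0xFFFFFFFF):
--     # Same data preparation as A, but a tableless bit-at-a-time CRC update:
--     # 0xEDB88320 is the bit-reflected form of the polynomial 0x04C11DB7.
--     data_byte = b''
--     for i in data:
--         data_byte += reflect(i, 32).to_bytes(4, byteorder='little')
--     for b in data_byte:
--         crc_val ^= b
--         for _ in range(8):
--             crc_val = (crc_val >> 1) ^ 0xEDB88320 if (crc_val & 1) else (crc_val >> 1)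
--     return reflect(crc_val, 32)
-- ===== Notes on version B (the rewrite author's own statement) =====
-- stated objective: simpler
-- what changed: Replaced A's 256-entry lookup table (built with reflections and forward-polynomial steps) and its table-indexed byte loop by a tableless bit-at-a-time CRC update using the reflected polynomial 0xEDB88320; the data preparation and final reflection are unchanged.
import Mathlib
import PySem

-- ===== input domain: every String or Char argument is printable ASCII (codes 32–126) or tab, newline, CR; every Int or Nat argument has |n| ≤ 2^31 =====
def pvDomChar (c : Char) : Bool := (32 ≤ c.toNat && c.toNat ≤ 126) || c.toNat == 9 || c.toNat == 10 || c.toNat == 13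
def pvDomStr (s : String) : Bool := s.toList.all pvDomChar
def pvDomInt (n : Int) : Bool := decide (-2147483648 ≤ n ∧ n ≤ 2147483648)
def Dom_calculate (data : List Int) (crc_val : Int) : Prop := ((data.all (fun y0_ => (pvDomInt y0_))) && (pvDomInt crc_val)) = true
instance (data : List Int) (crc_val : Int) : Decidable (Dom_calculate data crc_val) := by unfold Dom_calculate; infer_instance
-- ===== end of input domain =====

-- B replaces A's 256-entry CRC lookup table by a tableless bit-at-a-time update with the
-- reflected polynomial 0xEDB88320 (simpler: no table); data preparation and final reflection unchanged.

-- ===== PORT A =====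
def polynom : Int := 0x04C11DB7

-- reflect(value_input, bits): loop over range(bits) with state (value, value_input).
-- '1 << (bits - (i+1))': the shift amount is nonnegative for every i produced by the range,
-- so '.toNat' is exact there. Shared by both Pythons (identical code in Source A and Source B).
def pyReflect (value_input : Int) (bits : Int) : Int :=
  ((PySem.List.pyRange 0 bits 1).foldl
    (fun (s : Int × Int) i =>
      (if PySem.Int.band s.2 1 ≠ 0 then PySem.Int.bor s.1 ((1 : Int) <<< ((bits - (i + 1)).toNat)) else s.1,
       s.2 >>> (1 : Nat)))
    (0, value_input)).1

-- body of A's 'for i in range(256)' table loop (the inner 'for j in range(8)' is a fold)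
def tableEntry (i : Int) : Int :=
  pyReflect
    ((PySem.List.pyRange 0 8 1).foldl
      (fun t _ =>
        PySem.Int.band
          (PySem.Int.bxor (t <<< (1 : Nat))
            (if PySem.Int.band t ((1 : Int) <<< (31 : Nat)) ≠ 0 then polynom else 0))
          0xFFFFFFFF)
      (pyReflect i 8 <<< (24 : Nat)))
    32

-- 'table = [0]*256; for i in range(256): table[i] = …' fills each slot once, in order
def crcTable : List Int := (PySem.List.pyRange 0 256 1).map tableEntry

-- reflect(i, 32).to_bytes(4, 'little'): reflect's result lies in [0, 2**32), so to_bytes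
-- never raises and yields exactly these four little-endian bytes. Identical in both Pythons.
def toBytesLE (r : Int) : List Int :=
  [PySem.Int.band r 255, PySem.Int.band (r >>> (8 : Nat)) 255,
   PySem.Int.band (r >>> (16 : Nat)) 255, PySem.Int.band (r >>> (24 : Nat)) 255]

def dataBytes (data : List Int) : List Int :=
  data.foldl (fun db i => db ++ toBytesLE (pyReflect i 32)) []

-- 'crc_val = (crc_val >> 8) ^ table[(crc_val & 0xff) ^ data_byte[i]] & 0xFFFFFFFF'
-- ('&' binds tighter than '^' in Python)
def crcByteStep (c b : Int) : Int :=
  PySem.Int.bxor (c >>> (8 : Nat))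
    (PySem.Int.band (PySem.List.pyGetD crcTable (PySem.Int.bxor (PySem.Int.band c 255) b) 0) 0xFFFFFFFF)

def calculate (data : List Int) (crc_val : Int) : Int :=
  let data_byte := dataBytes data
  let crc := (PySem.List.pyRange 0 (PySem.List.len data_byte) 1).foldl
    (fun c i => crcByteStep c (PySem.List.pyGetD data_byte i 0)) crc_val
  pyReflect crc 32

-- ===== PORT B =====
-- 'crc_val = (crc_val >> 1) ^ 0xEDB88320 if (crc_val & 1) else (crc_val >> 1)'
def bitStep (c : Int) : Int :=
  if PySem.Int.band c 1 ≠ 0 then PySem.Int.bxor (c >>> (1 : Nat)) 0xEDB88320 else c >>> (1 : Nat)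

-- body of B's 'for b in data_byte' loop: 'crc_val ^= b' then 'for _ in range(8)'
def byteStepB (c b : Int) : Int :=
  (PySem.List.pyRange 0 8 1).foldl (fun c _ => bitStep c) (PySem.Int.bxor c b)

def calculate_alt (data : List Int) (crc_val : Int) : Int :=
  let data_byte := dataBytes data
  pyReflect (data_byte.foldl byteStepB crc_val) 32

-- ===== PRECONDITION & SPEC =====
def Spec_calculate (data : List Int) (crc_val : Int) (out : Int) : Prop := out = calculate_alt data crc_val
instance (data : List Int) (crc_val : Int) (out : Int) : Decidable (Spec_calculate data crc_val out) := by unfold Spec_calculate; infer_instance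

-- ===== CLAIM (what is proved, stated in full; the proofs are below) =====
def Claim_equal_calculate : Prop := ∀ (data : List Int) (crc_val : Int), Dom_calculate data crc_val → Spec_calculate data crc_val (calculate data crc_val)

-- ===== LEMMAS AND PROOFS =====

-- Nat model of B's bit loop
def nP : Nat := 0xEDB88320
def nstep (m : Nat) : Nat := if m &&& 1 ≠ 0 then (m >>> 1) ^^^ nP else m >>> 1
def nsteps : Nat → Nat → Nat
  | 0, m => m
  | k+1, m => nsteps k (nstep m)
-- dual step: what bitStep does on the complement encoding of a negative crc
def ndstep (m : Nat) : Nat := if m &&& 1 ≠ 0 then m >>> 1 else (m >>> 1) ^^^ nP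
def ndsteps : Nat → Nat → Nat
  | 0, m => m
  | k+1, m => ndsteps k (ndstep m)
def nC : Nat → Nat
  | 0 => 0
  | k+1 => nsteps k nP ^^^ nC k

-- Nat mirrors of A's table-entry computation (same fold shapes, on Nat)
def natReflect (v bits : Nat) : Nat :=
  ((List.range bits).foldl
    (fun (s : Nat × Nat) i => (if s.2 &&& 1 ≠ 0 then s.1 ||| (1 <<< (bits - (i + 1))) else s.1, s.2 >>> 1))
    (0, v)).1

def natTableEntry (x : Nat) : Nat :=
  natReflect
    ((List.range 8).foldl
      (fun t _ => ((t <<< 1) ^^^ (if t &&& (1 <<< 31) ≠ 0 then 0x04C11DB7 else 0)) &&& 0xFFFFFFFF)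
      (natReflect x 8 <<< 24))
    32

theorem nstep_xor (x y : Nat) : nstep (x ^^^ y) = nstep x ^^^ nstep y := by
  unfold nstep
  rw [Nat.and_xor_distrib_right, Nat.shiftRight_xor_distrib]
  rcases Nat.mod_two_eq_zero_or_one x with hx | hx <;>
  rcases Nat.mod_two_eq_zero_or_one y with hy | hy <;>
    simp [Nat.and_one_is_mod, hx, hy, Nat.xor_comm, Nat.xor_left_comm]

theorem nsteps_xor (k x y : Nat) : nsteps k (x ^^^ y) = nsteps k x ^^^ nsteps k y := by
  induction k generalizing x y with
  | zero => rfl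
  | succ k ih => simp [nsteps, nstep_xor, ih]

theorem nstep_shift (h k : Nat) : nstep (h <<< (k+1)) = h <<< k := by
  unfold nstep
  rw [Nat.shiftLeft_succ]
  simp [Nat.and_one_is_mod, Nat.mul_mod_right, Nat.shiftRight_one]

theorem nsteps_shift (k h : Nat) : nsteps k (h <<< k) = h := by
  induction k generalizing h with
  | zero => simp [nsteps]
  | succ k ih => show nsteps k (nstep (h <<< (k+1))) = h; rw [nstep_shift]; exact ih h

theorem nsteps8_shift (h : Nat) : nsteps 8 (h <<< 8) = h := nsteps_shift 8 h

theorem testBit255 (i : Nat) : Nat.testBit 255 i = decide (i < 8) := by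
  have h := Nat.testBit_two_pow_sub_one 8 i
  norm_num at h
  exact h

theorem decomp (n : Nat) : ((n >>> 8) <<< 8) ^^^ (n &&& 255) = n := by
  apply Nat.eq_of_testBit_eq
  intro i
  simp [Nat.testBit_xor, Nat.testBit_shiftLeft, Nat.testBit_and, Nat.testBit_shiftRight, testBit255]
  by_cases h : 8 ≤ i
  · simp [h, Nat.not_lt.mpr h, Nat.add_sub_cancel' h]
  · simp [h, Nat.lt_of_not_le h]

theorem nN1 (n b : Nat) : nsteps 8 (n ^^^ b) = (n >>> 8) ^^^ nsteps 8 ((n &&& 255) ^^^ b) := by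
  conv_lhs => rw [← decomp n]
  rw [Nat.xor_assoc, nsteps_xor, nsteps8_shift]

theorem ndstep_eq (m : Nat) : ndstep m = nstep m ^^^ nP := by
  unfold ndstep nstep
  split_ifs with h
  · rw [Nat.xor_assoc, Nat.xor_self, Nat.xor_zero]
  · rfl

theorem ndsteps_eq (k m : Nat) : ndsteps k m = nsteps k m ^^^ nC k := by
  induction k generalizing m with
  | zero => simp [ndsteps, nsteps, nC]
  | succ k ih =>
    show ndsteps k (ndstep m) = nsteps k (nstep m) ^^^ nC (k+1)
    rw [ih, ndstep_eq, nsteps_xor]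
    show nsteps k (nstep m) ^^^ nsteps k nP ^^^ nC k = nsteps k (nstep m) ^^^ (nsteps k nP ^^^ nC k)
    rw [Nat.xor_assoc]

theorem nC8 : nC 8 = nsteps 8 255 := by decide

theorem and255_lt (m : Nat) : m &&& 255 < 256 := by
  have h := Nat.and_two_pow_sub_one_eq_mod m 8
  norm_num at h
  rw [h]; omega

set_option maxRecDepth 10000 in
theorem sub255 (m : Nat) : 255 - (255 &&& m) = 255 ^^^ (m &&& 255) := by
  rw [Nat.and_comm 255 m]
  have h : ∀ y : Fin 256, 255 - y.val = 255 ^^^ y.val := by decide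
  exact h ⟨m &&& 255, and255_lt m⟩

theorem nN2 (m b : Nat) :
    ndsteps 8 (m ^^^ b) = (m >>> 8) ^^^ nsteps 8 ((255 - (255 &&& m)) ^^^ b) := by
  rw [ndsteps_eq, nC8, nN1, sub255]
  simp [nsteps_xor, Nat.xor_comm, Nat.xor_left_comm]

theorem nstep_lt {m : Nat} (h : m < 2 ^ 32) : nstep m < 2 ^ 32 := by
  have h1 : m >>> 1 < 2 ^ 32 := by rw [Nat.shiftRight_one]; omega
  have h2 : nP < 2 ^ 32 := by decide
  unfold nstep
  split_ifs with hc
  · exact Nat.xor_lt_two_pow h1 h2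
  · exact h1

theorem nsteps8_lt {m : Nat} (h : m < 2 ^ 32) : nsteps 8 m < 2 ^ 32 := by
  have g : ∀ k {m : Nat}, m < 2 ^ 32 → nsteps k m < 2 ^ 32 := by
    intro k
    induction k with
    | zero => exact fun hm => hm
    | succ k ih => exact fun hm => ih (nstep_lt hm)
  exact g 8 h

-- cast bridges
theorem foldl_const_cast {α : Type} (fI : Int → Int) (fN : Nat → Nat)
    (h : ∀ n : Nat, fI (n : Int) = ((fN n : Nat) : Int)) :
    ∀ (l : List α) (t : Nat), l.foldl (fun t _ => fI t) ((t : Nat) : Int) = ((l.foldl (fun t _ => fN t) t : Nat) : Int) := by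
  intro l
  induction l with
  | nil => intro t; rfl
  | cons x l ih => intro t; simp only [List.foldl_cons]; rw [h t]; exact ih (fN t)

theorem foldl_const_congr {α β γ : Type} (f : γ → γ) :
    ∀ (l₁ : List α) (l₂ : List β), l₁.length = l₂.length →
      ∀ t : γ, l₁.foldl (fun t _ => f t) t = l₂.foldl (fun t _ => f t) t := by
  intro l₁
  induction l₁ with
  | nil => intro l₂ h t; cases l₂ with
    | nil => rfl
    | cons y l₂ => simp at h
  | cons x l₁ ih => intro l₂ h t; cases l₂ with
    | nil => simp at h
    | cons y l₂ =>
      simp only [List.length_cons, Nat.add_right_cancel_iff] at h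
      simp only [List.foldl_cons]
      exact ih l₂ h (f t)

theorem nsteps_foldl {α : Type} : ∀ (l : List α) (t : Nat),
    l.foldl (fun t _ => nstep t) t = nsteps l.length t := by
  intro l
  induction l with
  | nil => intro t; rfl
  | cons x l ih => intro t; simp only [List.foldl_cons, List.length_cons]; rw [ih (nstep t)]; rfl

theorem ndsteps_foldl {α : Type} : ∀ (l : List α) (t : Nat),
    l.foldl (fun t _ => ndstep t) t = ndsteps l.length t := by
  intro l
  induction l with
  | nil => intro t; rfl
  | cons x l ih => intro t; simp only [List.foldl_cons, List.length_cons]; rw [ih (ndstep t)]; rfl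

theorem band_negSucc_natCast (m b : Nat) : PySem.Int.band (Int.negSucc m) (b : Int) = ((b - (b &&& m) : Nat) : Int) := by
  rw [Int.negSucc_eq]
  have h1 : ¬ (0 ≤ -((m:Int)+1)) := by omega
  have h2 : (0:Int) ≤ (b:Int) := by positivity
  simp only [PySem.Int.band, if_neg h1, if_pos h2]
  have h3 : (-(-((m:Int)+1))-1).toNat = m := by omega
  rw [h3, Int.toNat_natCast]

theorem bxor_negSucc_natCast (m b : Nat) : PySem.Int.bxor (Int.negSucc m) (b : Int) = Int.negSucc (m ^^^ b) := by
  rw [Int.negSucc_eq]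
  have h1 : ¬ (0 ≤ -((m:Int)+1)) := by omega
  have h2 : (0:Int) ≤ (b:Int) := by positivity
  simp only [PySem.Int.bxor, if_neg h1, if_pos h2]
  have h3 : (-(-((m:Int)+1))-1).toNat = m := by omega
  rw [h3, Int.toNat_natCast, Int.negSucc_eq]
  ring

theorem shiftRight_negSucc_nat (m k : Nat) : (Int.negSucc m) >>> k = Int.negSucc (m >>> k) := rfl

theorem foldl_pair_cast (fI : Int × Int → Nat → Int × Int) (fN : Nat × Nat → Nat → Nat × Nat)
    (h : ∀ a u i, fI (((a : Nat) : Int), ((u : Nat) : Int)) i = (((fN (a, u) i).1 : Int), ((fN (a, u) i).2 : Int))) :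
    ∀ (l : List Nat) (a u : Nat),
      l.foldl fI ((a : Int), (u : Int)) = (((l.foldl fN (a, u)).1 : Int), ((l.foldl fN (a, u)).2 : Int)) := by
  intro l
  induction l with
  | nil => intro a u; rfl
  | cons i l ih =>
    intro a u
    simp only [List.foldl_cons]
    rw [h a u i, ih (fN (a, u) i).1 (fN (a, u) i).2]

theorem natReflect_cast (v bits : Nat) : pyReflect (v : Int) ((bits : Nat) : Int) = ((natReflect v bits : Nat) : Int) := by
  unfold pyReflect natReflect
  rw [PySem.List.pyRange_one]
  simp only [Int.sub_zero, Int.toNat_natCast, zero_add, List.foldl_map]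
  have h := foldl_pair_cast
    (fun (s : Int × Int) (i : Nat) =>
      (if PySem.Int.band s.2 1 ≠ 0 then PySem.Int.bor s.1 ((1 : Int) <<< ((((bits : Nat) : Int)) - ((i : Int) + 1)).toNat) else s.1,
       s.2 >>> (1 : Nat)))
    (fun (s : Nat × Nat) (i : Nat) =>
      (if s.2 &&& 1 ≠ 0 then s.1 ||| (1 <<< (bits - (i + 1))) else s.1, s.2 >>> 1))
    (fun a u i => by
      have hamt : ((((bits : Nat) : Int)) - ((i : Int) + 1)).toNat = bits - (i + 1) := by omega
      have hsh : (1 : Int) <<< (bits - (i + 1)) = ((1 <<< (bits - (i + 1)) : Nat) : Int) := rfl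
      have hband : PySem.Int.band ((u : Nat) : Int) 1 = ((u &&& 1 : Nat) : Int) := by
        rw [show (1 : Int) = ((1 : Nat) : Int) from rfl, PySem.Int.band_natCast]
      simp only
      rw [hamt, hband]
      simp only [ne_eq, Int.natCast_eq_zero]
      split_ifs with hc <;>
        first
          | (rw [hsh, PySem.Int.bor_natCast]; rfl)
          | rfl)
    (List.range bits) 0 v
  simp only [Nat.cast_zero] at h
  rw [h]

theorem fwdStep_cast (t : Nat) :
    PySem.Int.band
      (PySem.Int.bxor (((t : Nat) : Int) <<< (1 : Nat))
        (if PySem.Int.band ((t : Nat) : Int) ((1 : Int) <<< (31 : Nat)) ≠ 0 then polynom else 0))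
      0xFFFFFFFF
    = ((((t <<< 1) ^^^ (if t &&& (1 <<< 31) ≠ 0 then 0x04C11DB7 else 0)) &&& 0xFFFFFFFF : Nat) : Int) := by
  have h31 : (1 : Int) <<< (31 : Nat) = (((1 <<< 31 : Nat)) : Int) := rfl
  have hsh : ((t : Nat) : Int) <<< (1 : Nat) = ((t <<< 1 : Nat) : Int) := rfl
  have hpoly : polynom = (((0x04C11DB7 : Nat)) : Int) := by unfold polynom; norm_num
  have hmask : (0xFFFFFFFF : Int) = (((0xFFFFFFFF : Nat)) : Int) := by norm_num
  have hzero : (0 : Int) = (((0 : Nat)) : Int) := rfl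
  rw [h31, PySem.Int.band_natCast, hsh, hpoly, hmask]
  simp only [ne_eq, Int.natCast_eq_zero]
  split_ifs with hc <;>
    first
      | rw [PySem.Int.bxor_natCast, PySem.Int.band_natCast]
      | rw [hzero, PySem.Int.bxor_natCast, PySem.Int.band_natCast]

theorem tableEntry_cast (x : Nat) : tableEntry (x : Int) = ((natTableEntry x : Nat) : Int) := by
  unfold tableEntry natTableEntry
  have hr8 : pyReflect ((x : Nat) : Int) (8 : Int) = ((natReflect x 8 : Nat) : Int) := by
    exact_mod_cast natReflect_cast x 8
  rw [hr8]
  have hsh : ((natReflect x 8 : Nat) : Int) <<< (24 : Nat) = ((natReflect x 8 <<< 24 : Nat) : Int) := rfl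
  rw [hsh]
  have hlen : (PySem.List.pyRange 0 8 1).length = (List.range 8).length := by
    rw [PySem.List.length_pyRange_one, List.length_range]
    rfl
  rw [foldl_const_congr _ (PySem.List.pyRange 0 8 1) (List.range 8) hlen]
  rw [foldl_const_cast _ _ fwdStep_cast (List.range 8) (natReflect x 8 <<< 24)]
  exact_mod_cast natReflect_cast _ 32

set_option maxRecDepth 100000 in
theorem entry_val : ∀ x : Fin 256, natTableEntry x.val = nsteps 8 x.val := by
  decide

theorem table_lookup (x : Nat) (hx : x < 256) :
    PySem.List.pyGetD crcTable (x : Int) 0 = ((nsteps 8 x : Nat) : Int) := by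
  unfold crcTable
  rw [PySem.List.pyGetD_map_pyRange_of_nonneg tableEntry 256 (x : Int) 0 (by positivity) (by exact_mod_cast hx)]
  rw [tableEntry_cast, entry_val ⟨x, hx⟩]

-- bitStep on the two Int constructors
theorem bitStep_cast (n : Nat) : bitStep (n : Int) = ((nstep n : Nat) : Int) := by
  unfold bitStep nstep nP
  have hband : PySem.Int.band ((n : Nat) : Int) 1 = ((n &&& 1 : Nat) : Int) := by
    rw [show (1 : Int) = ((1 : Nat) : Int) from rfl, PySem.Int.band_natCast]
  have hP : (0xEDB88320 : Int) = (((0xEDB88320 : Nat)) : Int) := by norm_num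
  have hshr : ((n : Nat) : Int) >>> (1 : Nat) = ((n >>> 1 : Nat) : Int) := rfl
  rw [hband]
  simp only [ne_eq, Int.natCast_eq_zero]
  split_ifs with hc <;>
    first
      | rw [hshr, hP, PySem.Int.bxor_natCast]
      | rw [hshr]

theorem bitStep_negSucc (m : Nat) : bitStep (Int.negSucc m) = Int.negSucc (ndstep m) := by
  unfold bitStep ndstep nP
  have hband : PySem.Int.band (Int.negSucc m) 1 = ((1 - (1 &&& m) : Nat) : Int) := by
    rw [show (1 : Int) = ((1 : Nat) : Int) from rfl, band_negSucc_natCast]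
  have hshr : (Int.negSucc m) >>> (1 : Nat) = Int.negSucc (m >>> 1) := rfl
  have hP : (0xEDB88320 : Int) = (((0xEDB88320 : Nat)) : Int) := by norm_num
  rw [hband, hshr]
  have hmod : 1 &&& m = m % 2 := Nat.one_and_eq_mod_two m
  have hmod2 : m &&& 1 = m % 2 := Nat.and_one_is_mod m
  rcases Nat.mod_two_eq_zero_or_one m with he | he
  · rw [if_pos (show ¬ ((1 - (1 &&& m) : Nat) : Int) = 0 by rw [hmod, he]; norm_num),
        if_neg (show ¬ m &&& 1 ≠ 0 by rw [hmod2, he]; simp),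
        hP, bxor_negSucc_natCast]
  · rw [if_neg (show ¬ ¬ ((1 - (1 &&& m) : Nat) : Int) = 0 by rw [hmod, he]; norm_num),
        if_pos (show m &&& 1 ≠ 0 by rw [hmod2, he]; simp)]

theorem byteStepB_cast (n b : Nat) : byteStepB (n : Int) (b : Int) = ((nsteps 8 (n ^^^ b) : Nat) : Int) := by
  unfold byteStepB
  rw [PySem.Int.bxor_natCast]
  have hlen : (PySem.List.pyRange 0 8 1).length = (List.range 8).length := by
    rw [PySem.List.length_pyRange_one, List.length_range]; rfl
  rw [foldl_const_congr _ (PySem.List.pyRange 0 8 1) (List.range 8) hlen]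
  rw [foldl_const_cast _ _ bitStep_cast (List.range 8) (n ^^^ b)]
  rw [nsteps_foldl, List.length_range]

theorem foldl_const_negSucc' {α : Type} (fI : Int → Int) (fN : Nat → Nat)
    (h : ∀ m : Nat, fI (Int.negSucc m) = Int.negSucc (fN m)) :
    ∀ (l : List α) (t : Nat), l.foldl (fun t _ => fI t) (Int.negSucc t) = Int.negSucc (l.foldl (fun t _ => fN t) t) := by
  intro l
  induction l with
  | nil => intro t; rfl
  | cons x l ih => intro t; simp only [List.foldl_cons]; rw [h t]; exact ih (fN t)

theorem byteStepB_negSucc (m b : Nat) : byteStepB (Int.negSucc m) (b : Int) = Int.negSucc (ndsteps 8 (m ^^^ b)) := by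
  unfold byteStepB
  rw [bxor_negSucc_natCast]
  have hlen : (PySem.List.pyRange 0 8 1).length = (List.range 8).length := by
    rw [PySem.List.length_pyRange_one, List.length_range]; rfl
  rw [foldl_const_congr _ (PySem.List.pyRange 0 8 1) (List.range 8) hlen]
  rw [foldl_const_negSucc' _ _ bitStep_negSucc (List.range 8) (m ^^^ b)]
  rw [ndsteps_foldl, List.length_range]

theorem crcByteStep_cast (n b : Nat) (hb : b < 256) :
    crcByteStep (n : Int) (b : Int) = (((n >>> 8) ^^^ nsteps 8 ((n &&& 255) ^^^ b) : Nat) : Int) := by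
  unfold crcByteStep
  have h255 : (255 : Int) = ((255 : Nat) : Int) := by norm_num
  have hmask : (0xFFFFFFFF : Int) = (((0xFFFFFFFF : Nat)) : Int) := by norm_num
  rw [h255, PySem.Int.band_natCast, PySem.Int.bxor_natCast]
  have hidx : (n &&& 255) ^^^ b < 256 := by
    have h1 : n &&& 255 < 2 ^ 8 := by have := and255_lt n; norm_num; omega
    have h2 : b < 2 ^ 8 := by norm_num; omega
    have := Nat.xor_lt_two_pow h1 h2
    norm_num at this; omega
  rw [table_lookup _ hidx, hmask, PySem.Int.band_natCast]
  have hsm : nsteps 8 ((n &&& 255) ^^^ b) &&& 0xFFFFFFFF = nsteps 8 ((n &&& 255) ^^^ b) := by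
    have hlt : nsteps 8 ((n &&& 255) ^^^ b) < 2 ^ 32 := nsteps8_lt (by omega)
    have h := Nat.and_two_pow_sub_one_eq_mod (nsteps 8 ((n &&& 255) ^^^ b)) 32
    norm_num at h ⊢
    rw [h]
    omega
  rw [hsm, show ((n : Nat) : Int) >>> (8 : Nat) = ((n >>> 8 : Nat) : Int) from rfl, PySem.Int.bxor_natCast]

theorem crcByteStep_negSucc (m b : Nat) (hb : b < 256) :
    crcByteStep (Int.negSucc m) (b : Int) = Int.negSucc ((m >>> 8) ^^^ nsteps 8 ((255 - (255 &&& m)) ^^^ b)) := by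
  unfold crcByteStep
  have h255 : (255 : Int) = ((255 : Nat) : Int) := by norm_num
  have hmask : (0xFFFFFFFF : Int) = (((0xFFFFFFFF : Nat)) : Int) := by norm_num
  rw [h255, band_negSucc_natCast, PySem.Int.bxor_natCast]
  have hidx : (255 - (255 &&& m)) ^^^ b < 256 := by
    have h1 : 255 - (255 &&& m) < 2 ^ 8 := by norm_num; omega
    have h2 : b < 2 ^ 8 := by norm_num; omega
    have := Nat.xor_lt_two_pow h1 h2
    norm_num at this; omega
  rw [table_lookup _ hidx, hmask, PySem.Int.band_natCast]
  have hsm : nsteps 8 ((255 - (255 &&& m)) ^^^ b) &&& 0xFFFFFFFF = nsteps 8 ((255 - (255 &&& m)) ^^^ b) := by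
    have hlt : nsteps 8 ((255 - (255 &&& m)) ^^^ b) < 2 ^ 32 := nsteps8_lt (by omega)
    have h := Nat.and_two_pow_sub_one_eq_mod (nsteps 8 ((255 - (255 &&& m)) ^^^ b)) 32
    norm_num at h ⊢
    rw [h]
    omega
  rw [hsm, shiftRight_negSucc_nat m 8, bxor_negSucc_natCast]

theorem perByte (c : Int) (b : Nat) (hb : b < 256) : crcByteStep c (b : Int) = byteStepB c (b : Int) := by
  cases c with
  | ofNat n =>
    rw [Int.ofNat_eq_natCast, crcByteStep_cast n b hb, byteStepB_cast n b, ← nN1]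
  | negSucc m =>
    rw [crcByteStep_negSucc m b hb, byteStepB_negSucc m b, ← nN2]

theorem pyReflect_nonneg (v bits : Int) : 0 ≤ pyReflect v bits := by
  unfold pyReflect
  have key : ∀ (l : List Int) (s : Int × Int), 0 ≤ s.1 →
      0 ≤ (l.foldl
        (fun (s : Int × Int) i =>
          (if PySem.Int.band s.2 1 ≠ 0 then PySem.Int.bor s.1 ((1 : Int) <<< ((bits - (i + 1)).toNat)) else s.1,
           s.2 >>> (1 : Nat)))
        s).1 := by
    intro l
    induction l with
    | nil => intro s hs; exact hs
    | cons i l ih =>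
      intro s hs
      simp only [List.foldl_cons]
      apply ih
      dsimp only
      split_ifs with hc
      · have h1 : (1 : Int) <<< ((bits - (i + 1)).toNat) = (((1 <<< (bits - (i + 1)).toNat : Nat)) : Int) := rfl
        rw [show s.1 = ((s.1.toNat : Nat) : Int) from (Int.toNat_of_nonneg hs).symm, h1, PySem.Int.bor_natCast]
        positivity
      · exact hs
  exact key _ (0, v) le_rfl

theorem band255_byte (r : Int) (hr : 0 ≤ r) : ∃ b : Nat, b < 256 ∧ PySem.Int.band r 255 = (b : Int) := by
  refine ⟨r.toNat &&& 255, and255_lt _, ?_⟩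
  conv_lhs => rw [show (255 : Int) = ((255 : Nat) : Int) by norm_num,
      show r = ((r.toNat : Nat) : Int) from (Int.toNat_of_nonneg hr).symm]
  rw [PySem.Int.band_natCast]

theorem shiftRight_nonneg_of_nonneg {r : Int} (hr : 0 ≤ r) (k : Nat) : 0 ≤ r >>> k := by
  rw [show r = ((r.toNat : Nat) : Int) from (Int.toNat_of_nonneg hr).symm,
      show ((r.toNat : Nat) : Int) >>> k = ((r.toNat >>> k : Nat) : Int) from rfl]
  positivity

theorem dataBytes_mem (data : List Int) : ∀ x ∈ dataBytes data, ∃ b : Nat, b < 256 ∧ x = (b : Int) := by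
  unfold dataBytes
  rw [PySem.List.foldl_append_eq_flatMap, List.nil_append]
  intro x hx
  rw [List.mem_flatMap] at hx
  obtain ⟨i, _, hx⟩ := hx
  have hr : 0 ≤ pyReflect i 32 := pyReflect_nonneg i 32
  unfold toBytesLE at hx
  simp only [List.mem_cons, List.not_mem_nil, or_false] at hx
  rcases hx with h | h | h | h <;> subst h
  · obtain ⟨b, hb, he⟩ := band255_byte _ hr; exact ⟨b, hb, he⟩
  · obtain ⟨b, hb, he⟩ := band255_byte _ (shiftRight_nonneg_of_nonneg hr 8); exact ⟨b, hb, he⟩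
  · obtain ⟨b, hb, he⟩ := band255_byte _ (shiftRight_nonneg_of_nonneg hr 16); exact ⟨b, hb, he⟩
  · obtain ⟨b, hb, he⟩ := band255_byte _ (shiftRight_nonneg_of_nonneg hr 24); exact ⟨b, hb, he⟩

-- ===== VERDICT (by name: the statement is the Claim_ definition above) =====
theorem calculate_spec : Claim_equal_calculate := by
  intro data crc_val _
  unfold Spec_calculate
  show calculate data crc_val = calculate_alt data crc_val
  unfold calculate calculate_alt
  simp only [PySem.List.len_eq]
  rw [PySem.List.foldl_pyRange_zero_pyGetD' (dataBytes data) 0 crcByteStep crc_val]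
  rw [PySem.List.foldl_congr_mem (dataBytes data) crcByteStep byteStepB crc_val ?_]
  intro acc x hx
  obtain ⟨b, hb, rfl⟩ := dataBytes_mem data x hx
  exact perByte acc b hb
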